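-- pv_equiv track=rewrite | github.com/neochen2701/TQCPans | 練習題組/挑戰題答案檔/CSF-029.py | calculate_time_and_cost
-- ===== SOURCE A (Python) =====
-- def calculate_time_and_cost(items, target_items):
--     result = []
--
--     for target_item in target_items:
--         time = 0
--         cost = 0
--         storage_order = []
--
--         while items:
--             popped_item = items.pop()
--
--             if popped_item[0] != target_item:
--                 storage_order.append(popped_item)
--             else:
--                 time += len(storage_order) * 2 + 1
--                 cost += int(popped_item[1]) * 15
--                 result.append((target_item, time, cost))
--                 break
--         while storage_order:
--             items.append(storage_order.pop())
--     result.sort(key=lambda x: (-x[1], -x[2], x[0]))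
--
--     return result
-- ===== SOURCE B (Python) =====
-- def calculate_time_and_cost(items, target_items):
--     # One pass builds name -> stack of positions; each target is then an O(1)-ish
--     # lookup plus a small adjustment for already-removed items (no repeated
--     # pop/push-back passes over the stack).  NOTE: unlike A, this does not
--     # mutate `items`; the RETURN value is identical.
--     positions = {}
--     for i, item in enumerate(items):
--         positions.setdefault(item[0], []).append(i)
--     n = len(items)
--     removed = []
--     result = []
--     for t in target_items:
--         stack = positions.get(t, [])
--         if stack:
--             p = stack.pop()
--             above = (n - 1 - p) - sum(1 for r in removed if r > p)
--             removed.append(p)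
--             result.append((t, above * 2 + 1, int(items[p][1]) * 15))
--     result.sort(key=lambda x: (-x[1], -x[2], x[0]))
--     return result
-- ===== Notes on version B (the rewrite author's own statement) =====
-- stated objective: faster
-- what changed: B builds a dict name->stack of positions in one pass and answers each target by popping the topmost position and adjusting for already-removed items, instead of A's repeated pop-everything/push-everything-back stack walks; B does not mutate items (A does), the return value is identical.
-- outside the precondition, e.g. on calculate_time_and_cost([('a', 'x'), ('a', '1')], ['a']): A returns [('a', 1, 15)], B returns [('a', 1, 15)]
import Mathlib
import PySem

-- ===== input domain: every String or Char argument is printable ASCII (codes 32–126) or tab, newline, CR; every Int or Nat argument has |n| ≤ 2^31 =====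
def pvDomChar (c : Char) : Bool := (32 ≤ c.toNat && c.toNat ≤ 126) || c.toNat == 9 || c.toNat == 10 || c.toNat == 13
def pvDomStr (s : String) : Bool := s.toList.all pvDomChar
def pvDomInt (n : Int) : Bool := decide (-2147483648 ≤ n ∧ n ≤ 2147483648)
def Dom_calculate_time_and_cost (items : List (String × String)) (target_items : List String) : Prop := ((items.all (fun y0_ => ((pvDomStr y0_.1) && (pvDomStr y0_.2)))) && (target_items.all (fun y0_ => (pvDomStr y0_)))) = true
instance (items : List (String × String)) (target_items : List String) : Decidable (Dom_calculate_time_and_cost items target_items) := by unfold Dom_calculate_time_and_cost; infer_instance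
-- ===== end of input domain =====

-- B rebuilds the answer from a one-pass name→positions index instead of A's repeated
-- pop-everything/push-back stack walks (objective: faster).  A mutates `items` in place
-- (matched items are removed); B does not — the equivalence proved here is about the
-- RETURN value only.

-- int(s), defined on Pre_ (Pre_ guarantees isSome where Python calls int())
def pvParse (s : String) : Int := (PySem.Int.ofStr? s).getD 0

-- `result.sort(key=lambda x: (-x[1], -x[2], x[0]))` — shared library call of both
-- Pythons: strict lexicographic `<` on the key tuple (-time, -cost, name), stable
-- insertion sort exactly as PySem.List.sorted_eq_foldl_insertBy defines sorted().
def pvKeyLt (a b : String × Int × Int) : Bool :=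
  decide (b.2.1 < a.2.1 ∨ (a.2.1 = b.2.1 ∧ (b.2.2 < a.2.2 ∨ (a.2.2 = b.2.2 ∧ a.1 < b.1))))

def pvSort (l : List (String × Int × Int)) : List (String × Int × Int) :=
  l.foldl (fun acc x => PySem.List.insertBy pvKeyLt x acc) []

-- ===== PORT A =====
-- A's inner `while items:` loop.  Python pops from the END of `items`; the port walks
-- the REVERSED list head-first (top of stack = head), which is the same sequence of
-- popped items.  Returns (remaining rev-stack, storage_order, found (time, cost)).
def pvAInner (rev : List (String × String)) (storage : List (String × String))
    (target : String) :
    List (String × String) × List (String × String) × Option (Int × Int) :=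
  match rev with
  | [] => ([], storage, none)
  | p :: rest =>
    if p.1 ≠ target then pvAInner rest (storage ++ [p]) target
    else (rest, storage, some ((storage.length : Int) * 2 + 1, pvParse p.2 * 15))

-- A's outer `for target_item in target_items:` loop; the push-back
-- `while storage_order: items.append(storage_order.pop())` is, on the reversed
-- stack, exactly `storage ++ rest`.
def pvALoop (rev : List (String × String)) (targets : List String)
    (result : List (String × Int × Int)) : List (String × Int × Int) :=
  match targets with
  | [] => result
  | t :: ts =>
    match pvAInner rev [] t with
    | (rest, storage, some tc) => pvALoop (storage ++ rest) ts (result ++ [(t, tc.1, tc.2)])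
    | (rest, storage, none) => pvALoop (storage ++ rest) ts result

def calculate_time_and_cost (items : List (String × String)) (target_items : List String) :
    List (String × Int × Int) :=
  pvSort (pvALoop items.reverse target_items [])

-- ===== PORT B =====
-- Source B's main loop: pop the topmost stored position of the target, adjust for
-- already-removed positions.  `if stack: p = stack.pop()` = getLast?/dropLast;
-- `sum(1 for r in removed if r > p)` = length of the filter.
def pvBLoop (items : List (String × String)) (n : Int)
    (positions : PySem.Dict String (List Int)) (removed : List Int)
    (result : List (String × Int × Int)) (targets : List String) :
    List (String × Int × Int) :=
  match targets with
  | [] => result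
  | t :: ts =>
    let stack := positions.getD t []
    match stack.getLast? with
    | none => pvBLoop items n positions removed result ts
    | some p =>
      let above := (n - 1 - p) - ((removed.filter (fun r => decide (p < r))).length : Int)
      pvBLoop items n (positions.insert t stack.dropLast) (removed ++ [p])
        (result ++ [(t, above * 2 + 1, pvParse (PySem.List.pyGetD items p ("", "")).2 * 15)]) ts

-- `positions.setdefault(item[0], []).append(i)` = Dict.modify with default []
def calculate_time_and_cost_alt (items : List (String × String)) (target_items : List String) :
    List (String × Int × Int) :=
  let positions := (PySem.List.enumerate items).foldl
    (fun d q => d.modify q.2.1 [] (· ++ [q.1])) PySem.Dict.empty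
  pvSort (pvBLoop items (items.length : Int) positions [] [] target_items)

-- ===== PRECONDITION & SPEC =====
-- Pre_ excludes inputs where some item whose name occurs in target_items carries a
-- value string int() cannot parse: there Python A (and B) can raise ValueError.  It is
-- slightly wider than the exact raise set (with duplicate names only the topmost
-- occurrence is parsed, so A can still return — see the cite in claim.json).
def Pre_calculate_time_and_cost (items : List (String × String)) (target_items : List String) : Prop :=
  ∀ q ∈ items, q.1 ∈ target_items → (PySem.Int.ofStr? q.2).isSome = true
instance (items : List (String × String)) (target_items : List String) :
    Decidable (Pre_calculate_time_and_cost items target_items) := by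
  unfold Pre_calculate_time_and_cost; infer_instance

def pvWitness_calculate_time_and_cost : (List (String × String)) × List String :=
  ([("a", "2"), ("b", "3")], ["b", "a"])

def Spec_calculate_time_and_cost (items : List (String × String)) (target_items : List String)
    (out : List (String × Int × Int)) : Prop := out = calculate_time_and_cost_alt items target_items
instance (items : List (String × String)) (target_items : List String)
    (out : List (String × Int × Int)) : Decidable (Spec_calculate_time_and_cost items target_items out) := by
  unfold Spec_calculate_time_and_cost; infer_instance

-- ===== CLAIM (what is proved, stated in full; the proofs are below) =====
def Claim_equal_calculate_time_and_cost : Prop :=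
  ∀ (items : List (String × String)) (target_items : List String),
    Dom_calculate_time_and_cost items target_items →
    Pre_calculate_time_and_cost items target_items →
    Spec_calculate_time_and_cost items target_items (calculate_time_and_cost items target_items)

-- ===== LEMMAS AND PROOFS =====

-- the surviving stack after the positions in `removed` have been taken out
def pvSurv (items : List (String × String)) (removed : List Int) : List (Int × (String × String)) :=
  (PySem.List.enumerate items).filter (fun q => !(removed.contains q.1))

-- A's inner loop when nothing on the stack matches
theorem pvAInner_no_match (rev storage : List (String × String)) (t : String)
    (h : ∀ x ∈ rev, x.1 ≠ t) : pvAInner rev storage t = ([], storage ++ rev, none) := by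
  induction rev generalizing storage with
  | nil => simp [pvAInner]
  | cons p rest ih =>
    have hp : p.1 ≠ t := h p (by simp)
    simp only [pvAInner, if_pos hp]
    rw [ih _ (fun x hx => h x (by simp [hx]))]
    simp

-- A's inner loop when the first match is q, after the non-matching prefix `pre`
theorem pvAInner_found (pre post : List (String × String)) (storage : List (String × String))
    (q : String × String) (t : String) (hpre : ∀ x ∈ pre, x.1 ≠ t) (hq : q.1 = t) :
    pvAInner (pre ++ q :: post) storage t
      = (post, storage ++ pre, some (((storage ++ pre).length : Int) * 2 + 1, pvParse q.2 * 15)) := by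
  induction pre generalizing storage with
  | nil => simp [pvAInner, hq]
  | cons p rest ih =>
    have hp : p.1 ≠ t := hpre p (by simp)
    simp only [List.cons_append, pvAInner, if_pos hp]
    rw [ih _ (fun x hx => hpre x (by simp [hx]))]
    simp

-- decompose a list around the LAST element satisfying P
theorem pvLastMatchDecomp {β : Type} (P : β → Bool) (S : List β) (h : S.filter P ≠ []) :
    ∃ S₁ q S₂, S = S₁ ++ q :: S₂ ∧ P q = true ∧ S₂.filter P = [] ∧
      S.filter P = S₁.filter P ++ [q] := by
  induction S using List.reverseRecOn with
  | nil => simp at h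
  | append_singleton S' x ih =>
    by_cases hx : P x = true
    · exact ⟨S', x, [], by simp, hx, by simp, by simp [List.filter_append, hx]⟩
    · have hx' : P x = false := by simpa using hx
      have h' : S'.filter P ≠ [] := by
        simpa [List.filter_append, hx'] using h
      obtain ⟨S₁, q, S₂, hSeq, hq, hS₂, hfil⟩ := ih h'
      exact ⟨S₁, q, S₂ ++ [x], by simp [hSeq], hq,
        by simp [List.filter_append, hS₂, hx'],
        by simp [List.filter_append, hx', hfil]⟩

-- the entries of enumerate with index > p are a suffix
theorem pvEnumFilterGt {α : Type} (l : List α) (s p : Int) :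
    (PySem.List.enumerate l s).filter (fun q => decide (p < q.1))
      = (PySem.List.enumerate l s).drop ((p + 1 - s).toNat) := by
  induction l generalizing s with
  | nil => simp [PySem.List.enumerate_nil]
  | cons x l ih =>
    rw [PySem.List.enumerate_cons]
    by_cases hps : p < s
    · have h0 : (p + 1 - s).toNat = 0 := by omega
      have h0' : (p + 1 - (s + 1)).toNat = 0 := by omega
      simp only [List.filter_cons, decide_eq_true_eq, if_pos hps, h0, List.drop_zero]
      rw [ih (s + 1), h0', List.drop_zero]
    · have hps' : ¬ (p < s) := hps
      have h1 : (p + 1 - s).toNat = (p + 1 - (s + 1)).toNat + 1 := by omega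
      simp only [List.filter_cons, decide_eq_true_eq, if_neg hps', h1, List.drop_succ_cons]
      exact ih (s + 1)


-- one-step unfoldings of the two loops (definitional)
theorem pvALoop_cons (rev : List (String × String)) (t : String) (ts : List String)
    (res : List (String × Int × Int)) :
    pvALoop rev (t :: ts) res
      = match pvAInner rev [] t with
        | (rest, storage, some tc) => pvALoop (storage ++ rest) ts (res ++ [(t, tc.1, tc.2)])
        | (rest, storage, none) => pvALoop (storage ++ rest) ts res := rfl

theorem pvBLoop_cons (items : List (String × String)) (n : Int)
    (positions : PySem.Dict String (List Int)) (removed : List Int)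
    (res : List (String × Int × Int)) (t : String) (ts : List String) :
    pvBLoop items n positions removed res (t :: ts)
      = (let stack := positions.getD t []
         match stack.getLast? with
         | none => pvBLoop items n positions removed res ts
         | some p =>
           let above := (n - 1 - p) - ((removed.filter (fun r => decide (p < r))).length : Int)
           pvBLoop items n (positions.insert t stack.dropLast) (removed ++ [p])
             (res ++ [(t, above * 2 + 1, pvParse (PySem.List.pyGetD items p ("", "")).2 * 15)]) ts) := rfl

-- main invariant: A's walk over the surviving reversed stack = B's index bookkeeping
theorem pvLoopEq (items : List (String × String)) (ts : List String) :
    ∀ (removed : List Int) (positions : PySem.Dict String (List Int))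
      (res : List (String × Int × Int)),
    (∀ t, positions.getD t []
        = ((pvSurv items removed).filter (fun q => q.2.1 == t)).map (·.1)) →
    (∀ p : Int, 0 ≤ p → p < (items.length : Int) →
        ((removed.filter (fun r => decide (p < r))).length : Int)
          = (items.length : Int) - 1 - p
            - (((pvSurv items removed).filter (fun q => decide (p < q.1))).length : Int)) →
    pvALoop ((pvSurv items removed).reverse.map (·.2)) ts res
      = pvBLoop items (items.length : Int) positions removed res ts := by
  induction ts with
  | nil => intro removed positions res _ _; rfl
  | cons t ts ih =>
    intro removed positions res hpos h2
    by_cases hS : (pvSurv items removed).filter (fun q => q.2.1 == t) = []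
    · -- target not on the stack: both sides skip
      have hstack : positions.getD t [] = [] := by rw [hpos t, hS]; rfl
      have hnom : ∀ x ∈ (pvSurv items removed).reverse.map (fun y => y.2), x.1 ≠ t := by
        intro x hx
        simp only [List.mem_map, List.mem_reverse] at hx
        obtain ⟨qq, hqq, rfl⟩ := hx
        have h := List.filter_eq_nil_iff.mp hS qq hqq
        simpa using h
      have hA : pvALoop ((pvSurv items removed).reverse.map (fun y => y.2)) (t :: ts) res
          = pvALoop ((pvSurv items removed).reverse.map (fun y => y.2)) ts res := by
        rw [pvALoop_cons, pvAInner_no_match _ _ _ hnom]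
        simp
      have hB : pvBLoop items (items.length : Int) positions removed res (t :: ts)
          = pvBLoop items (items.length : Int) positions removed res ts := by
        rw [pvBLoop_cons, hstack]
        simp
      rw [hA, hB]
      exact ih removed positions res hpos h2
    · -- target found: decompose around the LAST matching survivor
      obtain ⟨S₁, q, S₂, hSeq, hq, hS₂, hfil⟩ :=
        pvLastMatchDecomp (fun q => q.2.1 == t) (pvSurv items removed) hS
      have hqt : q.2.1 = t := by simpa using hq
      have hqS : q ∈ pvSurv items removed := by rw [hSeq]; simp
      have hqE : q ∈ PySem.List.enumerate items := List.mem_of_mem_filter hqS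
      obtain ⟨k, hk, hqeq⟩ := (PySem.List.mem_enumerate_iff items 0 q).mp hqE
      have hp0 : q.1 = (k : Int) := by rw [hqeq]; simp
      have hq2 : q.2 = items[k] := by rw [hqeq]
      have hget : PySem.List.pyGetD items q.1 ("", "") = q.2 := by
        rw [hp0, hq2]
        simp only [PySem.List.pyGetD_natCast]
        exact List.getD_eq_getElem _ _ hk
      have hk0 : 0 ≤ q.1 := by rw [hp0]; exact Int.natCast_nonneg k
      have hkn : q.1 < (items.length : Int) := by rw [hp0]; exact_mod_cast hk
      have hpwS : (pvSurv items removed).Pairwise (fun a b => a.1 < b.1) :=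
        List.Pairwise.sublist List.filter_sublist (PySem.List.pairwise_lt_enumerate items 0)
      obtain ⟨hpw1, hpw2, hbet⟩ := List.pairwise_append.mp (hSeq ▸ hpwS)
      have hS₁lt : ∀ x ∈ S₁, x.1 < q.1 := fun x hx => hbet x hx q (by simp)
      have hS₂gt : ∀ x ∈ S₂, q.1 < x.1 := (List.pairwise_cons.mp hpw2).1
      have hstack : positions.getD t []
          = (S₁.filter (fun q => q.2.1 == t)).map (fun y => y.1) ++ [q.1] := by
        rw [hpos t, hfil, List.map_append]
        rfl
      have hfgt : (pvSurv items removed).filter (fun x => decide (q.1 < x.1)) = S₂ := by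
        rw [hSeq, List.filter_append, List.filter_cons]
        have h1 : S₁.filter (fun x => decide (q.1 < x.1)) = [] :=
          List.filter_eq_nil_iff.mpr (fun a ha => by
            have := hS₁lt a ha; simp; omega)
        have h2' : S₂.filter (fun x => decide (q.1 < x.1)) = S₂ :=
          List.filter_eq_self.mpr (fun a ha => by
            have := hS₂gt a ha; simpa using this)
        simp [h1, h2']
      have habv : (items.length : Int) - 1 - q.1
            - ((removed.filter (fun r => decide (q.1 < r))).length : Int) = (S₂.length : Int) := by
        have h := h2 q.1 hk0 hkn
        rw [hfgt] at h
        omega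
      have hrev : (pvSurv items removed).reverse.map (fun y => y.2)
          = (S₂.reverse.map (fun y => y.2)) ++ q.2 :: (S₁.reverse.map (fun y => y.2)) := by
        rw [hSeq]; simp
      have hpre : ∀ x ∈ S₂.reverse.map (fun y => y.2), x.1 ≠ t := by
        intro x hx
        simp only [List.mem_map, List.mem_reverse] at hx
        obtain ⟨qq, hqq, rfl⟩ := hx
        have h := List.filter_eq_nil_iff.mp hS₂ qq hqq
        simpa using h
      have hsplit : pvSurv items (removed ++ [q.1])
          = (pvSurv items removed).filter (fun r => !(r.1 == q.1)) := by
        unfold pvSurv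
        rw [List.filter_filter]
        apply List.filter_congr
        intro x _
        by_cases hx : x.1 = q.1 <;> simp [hx]
      have hS' : pvSurv items (removed ++ [q.1]) = S₁ ++ S₂ := by
        rw [hsplit, hSeq, List.filter_append, List.filter_cons]
        have h1 : S₁.filter (fun r => !(r.1 == q.1)) = S₁ :=
          List.filter_eq_self.mpr (fun a ha => by
            have := hS₁lt a ha; simp; omega)
        have h2' : S₂.filter (fun r => !(r.1 == q.1)) = S₂ :=
          List.filter_eq_self.mpr (fun a ha => by
            have := hS₂gt a ha; simp; omega)
        simp [h1, h2']
      have hposN : ∀ name,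
          (positions.insert t ((S₁.filter (fun q => q.2.1 == t)).map (fun y => y.1))).getD name []
            = ((pvSurv items (removed ++ [q.1])).filter (fun q => q.2.1 == name)).map (·.1) := by
        intro name
        rw [PySem.Dict.getD_insert, hS']
        by_cases hn : name = t
        · subst hn
          simp [List.filter_append, hS₂]
        · rw [if_neg hn, hpos name, hSeq]
          have hfalse : (q.2.1 == name) = false := by
            rw [hqt]
            simpa using fun h => hn h.symm
          rw [List.filter_append, List.filter_append, List.filter_cons, hfalse]
          simp
      have h2N : ∀ p : Int, 0 ≤ p → p < (items.length : Int) →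
          (((removed ++ [q.1]).filter (fun r => decide (p < r))).length : Int)
            = (items.length : Int) - 1 - p
              - (((pvSurv items (removed ++ [q.1])).filter (fun x => decide (p < x.1))).length : Int) := by
        intro p hp hpn
        have hold := h2 p hp hpn
        rw [hSeq, List.filter_append, List.filter_cons, List.length_append] at hold
        rw [hS', List.filter_append, List.length_append,
          List.filter_append, List.length_append]
        by_cases hpq : p < q.1
        · simp [hpq] at hold ⊢
          omega
        · simp [hpq] at hold ⊢
          omega
      have hAstep : pvALoop ((pvSurv items removed).reverse.map (fun y => y.2)) (t :: ts) res
          = pvALoop ((pvSurv items (removed ++ [q.1])).reverse.map (fun y => y.2)) ts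
              (res ++ [(t, (S₂.length : Int) * 2 + 1, pvParse q.2.2 * 15)]) := by
        rw [hrev, pvALoop_cons, pvAInner_found _ _ _ _ _ hpre hqt]
        simp [hS']
      have hBstep : pvBLoop items (items.length : Int) positions removed res (t :: ts)
          = pvBLoop items (items.length : Int)
              (positions.insert t ((S₁.filter (fun q => q.2.1 == t)).map (fun y => y.1)))
              (removed ++ [q.1])
              (res ++ [(t, (S₂.length : Int) * 2 + 1, pvParse q.2.2 * 15)]) ts := by
        rw [pvBLoop_cons, hstack]
        simp only [List.getLast?_concat, List.dropLast_concat]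
        rw [hget, habv]
      rw [hAstep, hBstep]
      exact ih (removed ++ [q.1]) _ _ hposN h2N

-- ===== VERDICT (by name: the statement is the Claim_ definition above) =====
theorem calculate_time_and_cost_spec : Claim_equal_calculate_time_and_cost := by
  intro items targets _hdom _hpre
  show pvSort (pvALoop items.reverse targets [])
      = pvSort (pvBLoop items (items.length : Int)
          ((PySem.List.enumerate items).foldl
            (fun d q => d.modify q.2.1 [] (fun x => x ++ [q.1])) PySem.Dict.empty) [] [] targets)
  refine congrArg pvSort ?_
  have hsurv0 : pvSurv items [] = PySem.List.enumerate items := by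
    unfold pvSurv; simp
  have hrev0 : (pvSurv items []).reverse.map (fun y => y.2) = items.reverse := by
    rw [hsurv0, List.map_reverse, PySem.List.map_snd_enumerate]
  have hpos0 : ∀ t, ((PySem.List.enumerate items).foldl
        (fun d q => d.modify q.2.1 [] (fun x => x ++ [q.1])) PySem.Dict.empty).getD t []
      = ((pvSurv items []).filter (fun q => q.2.1 == t)).map (·.1) := by
    intro t
    have hfold : (PySem.List.enumerate items).foldl
          (fun d q => d.modify q.2.1 [] (fun x => x ++ [q.1])) PySem.Dict.empty
        = ((PySem.List.enumerate items).map (fun q => (q.2.1, q.1))).foldl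
            (fun d p => d.modify p.1 [] (fun x => x ++ [p.2])) PySem.Dict.empty :=
      (List.foldl_map (f := fun q : Int × String × String => (q.2.1, q.1))
        (g := fun (d : PySem.Dict String (List Int)) (p : String × Int) =>
          d.modify p.1 [] (fun x => x ++ [p.2]))).symm
    rw [hfold, PySem.Dict.getD_foldl_modify_append, List.filter_map, hsurv0]
    simp [pysem, List.map_map, Function.comp_def]
  have h20 : ∀ p : Int, 0 ≤ p → p < (items.length : Int) →
      ((([] : List Int).filter (fun r => decide (p < r))).length : Int)
        = (items.length : Int) - 1 - p
          - (((pvSurv items []).filter (fun x => decide (p < x.1))).length : Int) := by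
    intro p hp hpn
    rw [hsurv0, pvEnumFilterGt items 0 p, List.length_drop, PySem.List.length_enumerate]
    simp only [List.filter_nil, List.length_nil, Nat.cast_zero]
    omega
  rw [← hrev0]
  exact pvLoopEq items targets [] _ [] hpos0 h20
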